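-- pv_equiv track=rewrite | github.com/ItayShlosberg/classifying-response-to-immunotherapy | scripts/classifying_cell_types.py | get_all_possible_combinations_of_markers
-- ===== SOURCE A (Python) =====
-- REDUCED_MHC2_GENES = ['HLA-DMA',  'HLA-DMB',  'HLA-DOA',  'HLA-DOB',
--                       'HLA-DPA1',  'HLA-DPB1',  'HLA-DQA1',  'HLA-DQB1',
--                       'HLA-DQB2',  'HLA-DRA',  'HLA-DRB1',  'HLA-DRB5']
--
-- def convert_MHC2_markers_tostr(markers):
--     """
--     In case where the marker "MHCII' is in the list of markers we'll replace it with the list of genes that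
--     make up MHCII. This list will be added as one string.
--     :param markers: list of markers
--     :return: The new markers list after converting it.
--     """
--     if 'MHCII' in markers:
--         markers = [m for m in markers if m != 'MHCII'] + [';'.join(REDUCED_MHC2_GENES)]
--     return markers
--
-- def get_all_possible_combinations_of_markers(celltype_markers):
--     """
--     While there are markers of a cell-type that have to be shown in order to classify a cell, the are other markers
--     separated with ';', so that only having one of them can be enough in order to be sure  that cell corresponding to
--     this cell-type. This function gives you all possible combinations of lists of markers, so that you can check each
--     of those list separately and if even in one of them you find a match you can define classify this cell.
--     :param celltype_markers: list of this cell-type markers. part of them can be a number of markers separated by ';'.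
--     :return: All combinations.
--     """
--     def recursive_combination_building(leftover, all_combinations=[[]]):
--         """
--         building recursively the combination-list.
--         :param leftover: The remaining part of the list that you should add to the final output.
--         :param all_combinations: the output that are being built recursively.
--         :return: all_combinations when we reach the stop-condition.
--         """
--         def meiosis_of_combination(and_markers, or_markers):
--             """
--             Divides and_markers is actually the all_combination list being built. or_markers is the current marker
--             (of list of markers separated by ';') and we want to add it for all combination lists.
--             :return: new_combinations - updated and_markers list.
--             """
--             new_combinations = []
--             for or_marker in or_markers:
--                 for and_marker in and_markers:
--                     new_combinations.append(and_marker + [or_marker])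
--             return new_combinations
--
--         if len(leftover) == 0:
--             return all_combinations
--         all_currrent_markers = leftover[0]
--         del leftover[0]
--         all_combination = meiosis_of_combination(all_combinations, all_currrent_markers)
--         return recursive_combination_building(leftover, all_combination)
--
--     initial_marker_structure = [s.split(';') for s in convert_MHC2_markers_tostr(celltype_markers)]
--     combinations = recursive_combination_building(initial_marker_structure)
--     return combinations
-- ===== SOURCE B (Python) =====
-- REDUCED_MHC2_GENES = ['HLA-DMA',  'HLA-DMB',  'HLA-DOA',  'HLA-DOB',
--                       'HLA-DPA1',  'HLA-DPB1',  'HLA-DQA1',  'HLA-DQB1',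
--                       'HLA-DQB2',  'HLA-DRA',  'HLA-DRB1',  'HLA-DRB5']
--
-- def get_all_possible_combinations_of_markers(celltype_markers):
--     markers = celltype_markers
--     if 'MHCII' in markers:
--         markers = [m for m in markers if m != 'MHCII'] + [';'.join(REDUCED_MHC2_GENES)]
--     result = [[]]
--     for s in markers:
--         group = s.split(';')
--         result = [combo + [m] for m in group for combo in result]
--     return result
-- ===== Notes on version B (the rewrite author's own statement) =====
-- stated objective: simpler
-- what changed: Replaces the recursive helper with its nested mutating append loops and 'del' by a single iterative fold that rebuilds the result with one comprehension per marker group (outer loop over the group so the first group varies fastest, matching A's order); the comprehension avoids A's per-element list.append calls.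
import Mathlib
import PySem

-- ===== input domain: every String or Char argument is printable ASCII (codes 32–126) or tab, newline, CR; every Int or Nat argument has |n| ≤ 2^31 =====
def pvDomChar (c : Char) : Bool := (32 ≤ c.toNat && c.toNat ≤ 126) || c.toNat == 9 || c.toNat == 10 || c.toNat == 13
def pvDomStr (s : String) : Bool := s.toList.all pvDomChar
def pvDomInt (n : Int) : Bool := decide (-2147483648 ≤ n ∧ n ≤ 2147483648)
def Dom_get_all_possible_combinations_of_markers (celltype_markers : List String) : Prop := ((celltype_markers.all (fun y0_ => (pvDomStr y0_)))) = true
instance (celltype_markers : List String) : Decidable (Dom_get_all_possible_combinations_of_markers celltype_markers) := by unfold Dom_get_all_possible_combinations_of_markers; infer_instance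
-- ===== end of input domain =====

-- B replaces the recursive nested-append combination builder with a single iterative fold; objective: simpler.


-- ===== PORT A =====
def pvReducedMHC2Genes : List String :=
  ["HLA-DMA", "HLA-DMB", "HLA-DOA", "HLA-DOB",
   "HLA-DPA1", "HLA-DPB1", "HLA-DQA1", "HLA-DQB1",
   "HLA-DQB2", "HLA-DRA", "HLA-DRB1", "HLA-DRB5"]

-- s.split(";"): sep is the nonempty literal ";", so Str.split? is always some (exact)
def pySplitSemi (s : String) : List String := (PySem.Str.split? s ";").getD []

-- convert_MHC2_markers_tostr
def pvConvertMHC2 (markers : List String) : List String :=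
  if markers.contains "MHCII" then
    (markers.filter (fun m => m != "MHCII")) ++ [PySem.Str.join ";" pvReducedMHC2Genes]
  else markers

-- meiosis_of_combination: nested loops appending and_marker + [or_marker]
def pvMeiosis (and_markers : List (List String)) (or_markers : List String) : List (List String) :=
  or_markers.foldl (fun acc or_m =>
    and_markers.foldl (fun acc2 and_m => acc2 ++ [and_m ++ [or_m]]) acc) []

-- recursive_combination_building
def pvRecBuild : List (List String) → List (List String) → List (List String)
  | [], all_combinations => all_combinations
  | g :: rest, all_combinations => pvRecBuild rest (pvMeiosis all_combinations g)

def get_all_possible_combinations_of_markers (celltype_markers : List String) : List (List String) :=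
  let markerStructure := (pvConvertMHC2 celltype_markers).map (fun s => pySplitSemi s)
  pvRecBuild markerStructure [[]]

-- ===== PORT B =====
def get_all_possible_combinations_of_markers_alt (celltype_markers : List String) : List (List String) :=
  let markers :=
    if celltype_markers.contains "MHCII" then
      (celltype_markers.filter (fun m => m != "MHCII")) ++ [PySem.Str.join ";" pvReducedMHC2Genes]
    else celltype_markers
  markers.foldl (fun result s =>
    (pySplitSemi s).flatMap (fun m => result.map (fun combo => combo ++ [m]))) [[]]

-- ===== PRECONDITION & SPEC =====
def Spec_get_all_possible_combinations_of_markers (celltype_markers : List String) (out : List (List String)) : Prop := out = get_all_possible_combinations_of_markers_alt celltype_markers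
instance (celltype_markers : List String) (out : List (List String)) : Decidable (Spec_get_all_possible_combinations_of_markers celltype_markers out) := by unfold Spec_get_all_possible_combinations_of_markers; infer_instance

-- ===== CLAIM (what is proved, stated in full; the proofs are below) =====
def Claim_equal_get_all_possible_combinations_of_markers : Prop := ∀ (celltype_markers : List String), Dom_get_all_possible_combinations_of_markers celltype_markers → Spec_get_all_possible_combinations_of_markers celltype_markers (get_all_possible_combinations_of_markers celltype_markers)

-- ===== LEMMAS AND PROOFS =====
theorem pvMeiosis_inner (init : List (List String)) (ands : List (List String)) (o : String) :
    ands.foldl (fun acc2 and_m => acc2 ++ [and_m ++ [o]]) init = init ++ ands.map (fun a => a ++ [o]) := by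
  induction ands generalizing init with
  | nil => simp [List.foldl]
  | cons a rest ih => simp [List.foldl, ih]

theorem pvMeiosis_eq (ands : List (List String)) (ors : List String) :
    pvMeiosis ands ors = ors.flatMap (fun o => ands.map (fun a => a ++ [o])) := by
  unfold pvMeiosis
  have h : ∀ (init : List (List String)) (l : List String),
      l.foldl (fun acc or_m => ands.foldl (fun acc2 and_m => acc2 ++ [and_m ++ [or_m]]) acc) init
        = init ++ l.flatMap (fun o => ands.map (fun a => a ++ [o])) := by
    intro init l
    induction l generalizing init with
    | nil => simp [List.foldl]
    | cons o rest ih => rw [List.foldl_cons, pvMeiosis_inner, ih]; simp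
  simpa using h [] ors

theorem pvRecBuild_eq (gs : List (List String)) (acc : List (List String)) :
    pvRecBuild gs acc
      = gs.foldl (fun res g => g.flatMap (fun m => res.map (fun combo => combo ++ [m]))) acc := by
  induction gs generalizing acc with
  | nil => rfl
  | cons g rest ih => simp [pvRecBuild, List.foldl, ih, pvMeiosis_eq]


-- ===== VERDICT (by name: the statement is the Claim_ definition above) =====
theorem get_all_possible_combinations_of_markers_spec : Claim_equal_get_all_possible_combinations_of_markers := by
  intro cm _
  unfold Spec_get_all_possible_combinations_of_markers
  unfold get_all_possible_combinations_of_markers get_all_possible_combinations_of_markers_alt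
  simp only [pvRecBuild_eq, List.foldl_map, pvConvertMHC2]
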